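-- pv_equiv track=rewrite | github.com/jayasurya-n/Leetcode | Daily_Problems/2025/June/q4.py | answerString
-- ===== SOURCE A (Python) =====
-- def answerString(word: str, numFriends: int) -> str:
--     # n = len(word)
--     # k = numFriends
--     # if(k==1):return word
--
--     # # i+n-1-e>=k-1
--     # # => e<=i+n-k
--     # ans = ""
--     # for i in range(n):
--     #     end = min(n-1,i+n-k)
--     #     candidate = word[i:end+1]
--     #     if(candidate>ans):
--     #         ans = candidate
--     # return ans
--
--     n = len(word)
--     if(numFriends==1):return word
--
--     i,j = 0,1
--     while j<n:
--         k = 0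
--         while j+k<n and word[i+k]==word[j+k]:k+=1
--         if(j+k<n and word[i+k]<word[j+k]):
--             i,j = j,max(j+1,i+k+1)
--         else:j = j+k+1
--
--     largest_lexo_suffix = word[i:]
--     m = len(largest_lexo_suffix)
--     return largest_lexo_suffix[:min(m,n-numFriends+1)]
-- ===== SOURCE B (Python) =====
-- def answerString(word, numFriends):
--     if numFriends == 1:
--         return word
--     best = ""
--     for i in range(len(word)):
--         suffix = word[i:]
--         if suffix > best:
--             best = suffix
--     return best[:min(len(best), len(word) - numFriends + 1)]
-- ===== Notes on version B (the rewrite author's own statement) =====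
-- stated objective: simpler
-- what changed: A's single-pass two-pointer maximal-suffix scan is replaced by a brute-force fold that takes the lexicographic maximum over all suffixes word[i:] and then applies the same truncation; the i/j/k pointer machinery disappears.
import Mathlib
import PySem

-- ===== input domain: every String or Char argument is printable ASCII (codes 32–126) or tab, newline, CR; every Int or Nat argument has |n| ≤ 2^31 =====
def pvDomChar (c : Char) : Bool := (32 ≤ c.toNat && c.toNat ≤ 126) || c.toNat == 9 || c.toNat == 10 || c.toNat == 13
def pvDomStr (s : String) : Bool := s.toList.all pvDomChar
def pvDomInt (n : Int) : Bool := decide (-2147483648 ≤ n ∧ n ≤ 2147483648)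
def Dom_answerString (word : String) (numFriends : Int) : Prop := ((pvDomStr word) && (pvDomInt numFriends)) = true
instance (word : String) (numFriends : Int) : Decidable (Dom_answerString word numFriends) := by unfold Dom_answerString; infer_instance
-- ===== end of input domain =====

-- B replaces A's linear two-pointer maximal-suffix scan by a brute-force maximum over all
-- suffixes (objective: simpler; B is not faster).

-- ===== PORT A =====
-- inner loop 'while j+k<n and word[i+k]==word[j+k]: k+=1'.  The character reads are via getD:
-- on every reachable state the guard gives j+k < n and the outer loop keeps i < j, so the
-- indices are in range and the default is never consulted (exact transliteration of the guarded read).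
def extA (w : List Char) (i j k : Nat) : Nat :=
  if h : j + k < w.length ∧ w.getD (i+k) default = w.getD (j+k) default then
    extA w i j (k+1)
  else k
termination_by w.length - (j + k)
decreasing_by omega

-- outer loop 'while j<n: …' over the state (i, j)
def loopA (w : List Char) (i j : Nat) : Nat :=
  if h : j < w.length then
    let k := extA w i j 0
    if j + k < w.length ∧ w.getD (i+k) default < w.getD (j+k) default then
      loopA w j (max (j+1) (i+k+1))
    else
      loopA w i (j+k+1)
  else i
termination_by w.length - j
decreasing_by all_goals omega

def answerString (word : String) (numFriends : Int) : String :=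
  let n : Int := PySem.Str.len word
  if numFriends = 1 then word
  else
    let i := loopA word.toList 0 1
    let largest := PySem.Str.slice word (some (i : Int)) none
    let m : Int := PySem.Str.len largest
    PySem.Str.slice largest none (some (min m (n - numFriends + 1)))

-- ===== PORT B =====
-- 'best = ""; for i in range(len(word)): suffix = word[i:]; if suffix > best: best = suffix'
def bestSuffix (word : String) : String :=
  (PySem.List.pyRange 0 (PySem.Str.len word) 1).foldl
    (fun best i =>
      let suffix := PySem.Str.slice word (some i) none
      if best < suffix then suffix else best) ""

def answerString_alt (word : String) (numFriends : Int) : String :=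
  if numFriends = 1 then word
  else
    let best := bestSuffix word
    PySem.Str.slice best none (some (min (PySem.Str.len best) (PySem.Str.len word - numFriends + 1)))

-- ===== PRECONDITION & SPEC =====
def Spec_answerString (word : String) (numFriends : Int) (out : String) : Prop := out = answerString_alt word numFriends
instance (word : String) (numFriends : Int) (out : String) : Decidable (Spec_answerString word numFriends out) := by unfold Spec_answerString; infer_instance

-- ===== CLAIM (what is proved, stated in full; the proofs are below) =====
def Claim_equal_answerString : Prop := ∀ (word : String) (numFriends : Int), Dom_answerString word numFriends → Spec_answerString word numFriends (answerString word numFriends)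

-- ===== LEMMAS AND PROOFS =====

-- a strict prefix is lexicographically smaller
theorem pvLtOfPrefixNe (a b : List Char) (h : a <+: b) (hne : a ≠ b) : a < b := by
  obtain ⟨t, rfl⟩ := h
  induction a with
  | nil =>
    cases t with
    | nil => simp at hne
    | cons c cs => exact List.nil_lt_cons c cs
  | cons x xs ih =>
    have hx : xs ≠ xs ++ t := by intro h; exact hne (by rw [List.cons_append, ← h])
    exact List.Lex.cons (ih hx)

-- two suffixes agreeing for m characters and then differing compare by that first differing character
theorem pvDropLtPoint (w : List Char) (m : Nat) : ∀ (a b : Nat), a + m < w.length → b + m < w.length →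
    (∀ s, s < m → w[a+s]? = w[b+s]?) →
    w.getD (a+m) default < w.getD (b+m) default →
    w.drop a < w.drop b := by
  induction m with
  | zero =>
    intro a b ha hb _ hlt
    rw [List.drop_eq_getElem_cons (by omega : a < w.length),
        List.drop_eq_getElem_cons (by omega : b < w.length)]
    apply List.Lex.rel
    rwa [List.getD_eq_getElem w default (by omega : a + 0 < w.length),
         List.getD_eq_getElem w default (by omega : b + 0 < w.length)] at hlt
  | succ m ih =>
    intro a b ha hb heq hlt
    have ha0 : a < w.length := by omega
    have hb0 : b < w.length := by omega
    have hhead : w[a] = w[b] := by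
      have := heq 0 (by omega)
      simpa [List.getElem?_eq_getElem, ha0, hb0] using this
    rw [List.drop_eq_getElem_cons ha0, List.drop_eq_getElem_cons hb0, hhead]
    apply List.Lex.cons
    apply ih (a+1) (b+1) (by omega) (by omega)
    · intro s hs
      have := heq (s+1) (by omega)
      rw [show a + 1 + s = a + (s+1) by omega, show b + 1 + s = b + (s+1) by omega]
      exact this
    · rw [show a + 1 + m = a + (m+1) by omega, show b + 1 + m = b + (m+1) by omega]
      exact hlt

-- if w[b:] runs to the end of w while agreeing with w[a:] on all of its characters, it is a
-- proper prefix of the longer w[a:], hence smaller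
theorem pvDropLtPrefix (w : List Char) (a b L : Nat) (hbL : b + L = w.length) (haL : a + L < w.length)
    (heq : ∀ s, s < L → w[a+s]? = w[b+s]?) :
    w.drop b < w.drop a := by
  have hpre : w.drop b = (w.drop a).take L := by
    apply List.ext_getElem
    · simp; omega
    · intro s h1 h2
      simp only [List.getElem_take, List.getElem_drop]
      have := heq s (by simp at h1; omega)
      have hsa : a + s < w.length := by simp at h1; omega
      have hsb : b + s < w.length := by simp at h1; omega
      simpa [List.getElem?_eq_getElem, hsa, hsb] using this.symm
  apply pvLtOfPrefixNe
  · rw [hpre]; exact List.take_prefix _ _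
  · intro h
    have := congrArg List.length h
    simp at this; omega

-- existence of the strictly maximal suffix (suffixes are pairwise distinct: distinct lengths)
theorem pvExistsMax (w : List Char) (hn : 0 < w.length) :
    ∃ M, M < w.length ∧ ∀ t, t < w.length → t ≠ M → w.drop t < w.drop M := by
  obtain ⟨M, hM, hmax⟩ := Finset.exists_max_image (Finset.range w.length)
    (fun t => w.drop t) ⟨0, by simpa using hn⟩
  refine ⟨M, by simpa using hM, fun t ht hne => ?_⟩
  have hle := hmax t (by simpa using ht)
  apply lt_of_le_of_ne hle
  intro h
  have := congrArg List.length h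
  simp at this
  simp at hM
  omega

-- specification of the inner loop: it extends the common prefix of w[i:] and w[j:] maximally
theorem pvExtSpec (w : List Char) (i j k : Nat) :
    k ≤ extA w i j k ∧
    (j + k ≤ w.length → j + extA w i j k ≤ w.length) ∧
    (∀ s, k ≤ s → s < extA w i j k → w.getD (i+s) default = w.getD (j+s) default) ∧
    ¬ (j + extA w i j k < w.length ∧ w.getD (i + extA w i j k) default = w.getD (j + extA w i j k) default) := by
  induction k using extA.induct (w := w) (i := i) (j := j) with
  | case1 k h ih =>
    rw [extA, dif_pos h]
    obtain ⟨ih1, ih2, ih3, ih4⟩ := ih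
    refine ⟨by omega, fun _ => ih2 (by omega), ?_, ih4⟩
    intro s hs1 hs2
    rcases Nat.eq_or_lt_of_le hs1 with rfl | hlt
    · exact h.2
    · exact ih3 s (by omega) hs2
  | case2 k h =>
    rw [extA, dif_neg h]
    exact ⟨le_refl _, fun hh => by by_contra hc; exact h ⟨by omega, by_contra fun hne => h ⟨by omega, by tauto⟩⟩, fun s h1 h2 => by omega, h⟩

-- the periodicity chain: in the mismatch-favours-j situation every suffix starting in (i, i+K]
-- is dominated by a suffix starting in (i+K, j+K]
theorem pvChain (w : List Char) (i j K : Nat) (hij : i < j) (hjK : j + K < w.length)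
    (heq : ∀ s, s < K → w[i+s]? = w[j+s]?)
    (hlt : w.getD (i+K) default < w.getD (j+K) default) :
    ∀ d t, i < t → t ≤ i + K → i + K - t ≤ d →
      ∃ v, i + K < v ∧ v ≤ j + K ∧ w.drop t < w.drop v := by
  intro d
  induction d with
  | zero =>
    intro t ht1 ht2 ht3
    refine ⟨t + (j - i), by omega, by omega, ?_⟩
    apply pvDropLtPoint w (i + K - t) t (t + (j-i)) (by omega) (by omega)
    · intro s hs; omega
    · have h1 : t + (i + K - t) = i + K := by omega
      have h2 : t + (j - i) + (i + K - t) = j + K := by omega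
      rw [h1, h2]; exact hlt
  | succ d ih =>
    intro t ht1 ht2 ht3
    have hstep : w.drop t < w.drop (t + (j - i)) := by
      apply pvDropLtPoint w (i + K - t) t (t + (j-i)) (by omega) (by omega)
      · intro s hs
        have hx : t + s - i < K := by omega
        have := heq (t + s - i) hx
        rw [show t + s = i + (t + s - i) by omega,
            show t + (j - i) + s = j + (t + s - i) by omega]
        exact this
      · rw [show t + (i + K - t) = i + K by omega,
            show t + (j - i) + (i + K - t) = j + K by omega]
        exact hlt
    by_cases h : i + K < t + (j - i)
    · exact ⟨t + (j - i), h, by omega, hstep⟩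
    · obtain ⟨v, hv1, hv2, hv3⟩ := ih (t + (j - i)) (by omega) (by omega) (by omega)
      exact ⟨v, hv1, hv2, lt_trans hstep hv3⟩

-- the outer loop lands exactly on the maximal-suffix start index
theorem pvLoopEq (w : List Char) (M : Nat) (hM : M < w.length)
    (hmax : ∀ t, t < w.length → t ≠ M → w.drop t < w.drop M) :
    ∀ fuel i j, w.length - j ≤ fuel → i < j → i < w.length → (M = i ∨ j ≤ M) →
      loopA w i j = M := by
  intro fuel
  induction fuel with
  | zero =>
    intro i j hf hij hi hinv
    have hj : ¬ j < w.length := by omega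
    rw [loopA, dif_neg hj]
    rcases hinv with rfl | h
    · rfl
    · omega
  | succ f ih =>
    intro i j hf hij hi hinv
    by_cases hj : j < w.length
    · rw [loopA, dif_pos hj]
      simp only []
      obtain ⟨-, hKle, hKeq, hKstop⟩ := pvExtSpec w i j 0
      set K := extA w i j 0 with hK
      have hjK : j + K ≤ w.length := hKle (by omega)
      have heq' : ∀ s, s < K → w[i+s]? = w[j+s]? := by
        intro s hs
        have h1 : i + s < w.length := by omega
        have h2 : j + s < w.length := by omega
        have h3 := hKeq s (by omega) hs
        rw [List.getD_eq_getElem w default h1, List.getD_eq_getElem w default h2] at h3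
        simp [h1, h2, h3]
      by_cases hc : j + K < w.length ∧ w.getD (i+K) default < w.getD (j+K) default
      · rw [if_pos hc]
        have hiK : i + K < w.length := by omega
        have h_ij : w.drop i < w.drop j := pvDropLtPoint w K i j hiK hc.1 heq' hc.2
        have hMj : j ≤ M := by
          rcases hinv with rfl | h
          · exfalso
            have h2 := hmax j hj (by omega)
            exact absurd h_ij (asymm h2)
          · exact h
        have hnot : ¬ (j < M ∧ M ≤ i + K) := by
          rintro ⟨h1, h2⟩
          obtain ⟨v, hv1, hv2, hv3⟩ := pvChain w i j K hij hc.1 heq' hc.2 (i+K) M (by omega) h2 (by omega)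
          have h4 := hmax v (by omega) (by omega)
          exact absurd hv3 (asymm h4)
        apply ih j (max (j+1) (i+K+1)) (by omega) (by omega) hj
        rcases Nat.eq_or_lt_of_le hMj with heq2 | hlt2
        · exact Or.inl heq2.symm
        · exact Or.inr (by omega)
      · rw [if_neg hc]
        have hinv' : M = i ∨ j + K + 1 ≤ M := by
          rcases hinv with rfl | h
          · exact Or.inl rfl
          · right
            by_contra hcon
            have hMK : M ≤ j + K := by omega
            have hdlt : M - j ≤ K := by omega
            have hid : i + (M - j) < w.length := by omega
            have hdom : w.drop M < w.drop (i + (M - j)) := by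
              by_cases hjkn : j + K < w.length
              · have hne : w.getD (i+K) default ≠ w.getD (j+K) default := fun he => hKstop ⟨hjkn, he⟩
                have hgt : w.getD (j+K) default < w.getD (i+K) default := by
                  rcases lt_trichotomy (w.getD (i+K) default) (w.getD (j+K) default) with h1|h1|h1
                  · exact absurd ⟨hjkn, h1⟩ hc
                  · exact absurd h1 hne
                  · exact h1
                have hres := pvDropLtPoint w (K - (M - j)) (j + (M - j)) (i + (M - j))
                  (by omega) (by omega)
                  (by
                    intro s hs
                    have h5 := heq' ((M - j) + s) (by omega)
                    rw [show j + (M - j) + s = j + ((M - j) + s) by omega,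
                        show i + (M - j) + s = i + ((M - j) + s) by omega]
                    exact h5.symm)
                  (by
                    rw [show j + (M - j) + (K - (M - j)) = j + K by omega,
                        show i + (M - j) + (K - (M - j)) = i + K by omega]
                    exact hgt)
                rwa [show j + (M - j) = M by omega] at hres
              · have hres := pvDropLtPrefix w (i + (M - j)) (j + (M - j)) (K - (M - j))
                  (by omega) (by omega)
                  (by
                    intro s hs
                    have h5 := heq' ((M - j) + s) (by omega)
                    rw [show j + (M - j) + s = j + ((M - j) + s) by omega,
                        show i + (M - j) + s = i + ((M - j) + s) by omega]
                    exact h5)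
                rwa [show j + (M - j) = M by omega] at hres
            have h6 := hmax (i + (M - j)) hid (by omega)
            exact absurd hdom (asymm h6)
        exact ih i (j+K+1) (by omega) (by omega) hi hinv'
    · rw [loopA, dif_neg hj]
      rcases hinv with rfl | h
      · rfl
      · omega

-- B's fold computes exactly the maximal suffix (as the Python slice word[M:])
theorem pvFoldEq (word : String) (M : Nat) (hM : M < word.toList.length)
    (hmax : ∀ t, t < word.toList.length → t ≠ M → word.toList.drop t < word.toList.drop M) :
    bestSuffix word = PySem.Str.slice word (some (M : Int)) none := by
  set w := word.toList with hw
  set n := w.length with hn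
  set g : Nat → String := fun t => PySem.Str.slice word (some (t : Int)) none with hgdef
  have hg : ∀ t : Nat, (g t).toList = w.drop t := by
    intro t; simp [hgdef, pysem, hw]
  have hglt : ∀ t, t < n → t ≠ M → g t < g M := by
    intro t ht hne
    rw [String.lt_iff_toList_lt, hg, hg]
    exact hmax t ht hne
  have hgpos : ∀ t, t < n → "" < g t := by
    intro t ht
    rw [String.lt_iff_toList_lt, hg]
    have : w.drop t = w[t] :: w.drop (t+1) := List.drop_eq_getElem_cons ht
    rw [this]
    exact List.nil_lt_cons _ _
  have hbs : bestSuffix word =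
      (List.range n).foldl (fun best k => if best < g k then g k else best) "" := by
    unfold bestSuffix
    have hlen : PySem.Str.len word = (n : Int) := by simp [pysem, hn, hw]
    rw [hlen, PySem.List.pyRange_one 0 (n : Int)]
    simp only [Int.sub_zero, Int.toNat_natCast, List.foldl_map, zero_add]
    rfl
  have hinv : ∀ m, m ≤ n →
      (m = 0 ∧ (List.range m).foldl (fun best k => if best < g k then g k else best) "" = "") ∨
      (∃ t, t < m ∧ (List.range m).foldl (fun best k => if best < g k then g k else best) "" = g t ∧
        ∀ s, s < m → g s ≤ (List.range m).foldl (fun best k => if best < g k then g k else best) "") := by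
    intro m
    induction m with
    | zero => intro _; left; simp
    | succ m ih =>
      intro hm
      right
      rw [List.range_succ, List.foldl_append, List.foldl_cons, List.foldl_nil]
      rcases ih (by omega) with ⟨hm0, hacc⟩ | ⟨t, ht, hacc, hle⟩
      · rw [hacc]
        rw [if_pos (hgpos m (by omega))]
        refine ⟨m, by omega, rfl, ?_⟩
        intro s hs
        have : s = m := by omega
        subst this
        exact le_refl _
      · rw [hacc]
        by_cases hcmp : g t < g m
        · rw [if_pos hcmp]
          refine ⟨m, by omega, rfl, ?_⟩
          intro s hs
          rcases Nat.lt_or_ge s m with h1 | h1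
          · exact le_trans (hacc ▸ hle s h1) (le_of_lt hcmp)
          · have : s = m := by omega
            subst this; exact le_refl _
        · rw [if_neg hcmp]
          refine ⟨t, by omega, rfl, ?_⟩
          intro s hs
          rcases Nat.lt_or_ge s m with h1 | h1
          · exact hacc ▸ hle s h1
          · have : s = m := by omega
            subst this
            exact not_lt.mp hcmp
  rw [hbs]
  rcases hinv n (le_refl n) with ⟨hn0, -⟩ | ⟨t, ht, hacc, hle⟩
  · omega
  · rw [hacc]
    by_cases hne : t = M
    · rw [hne]
    · exfalso
      have h1 := hglt t ht hne
      have h2 := hle M hM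
      rw [hacc] at h2
      exact absurd (lt_of_lt_of_le h1 h2) (lt_irrefl _)

-- a slice of the empty string is empty
theorem pvSliceNil (s : String) (hs : s.toList = []) (a b : Option Int) :
    PySem.Str.slice s a b = "" := by
  apply String.toList_inj.mp
  simp only [pysem, PySem.Str.toList_slice, hs]
  cases a <;> cases b <;> simp [PySem.List.slice]

-- ===== VERDICT (by name: the statement is the Claim_ definition above) =====
theorem answerString_spec : Claim_equal_answerString := by
  intro word numFriends _
  unfold Spec_answerString answerString answerString_alt
  by_cases hk : numFriends = 1
  · simp [hk]
  · simp only [if_neg hk]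
    by_cases hn : 0 < word.toList.length
    · obtain ⟨M, hM, hmax⟩ := pvExistsMax word.toList hn
      have hloop : loopA word.toList 0 1 = M :=
        pvLoopEq word.toList M hM hmax word.toList.length 0 1 (by omega) (by omega) hn (by omega)
      have hfold := pvFoldEq word M hM hmax
      rw [hloop, hfold]
    · have hnil : word.toList = [] := List.eq_nil_of_length_eq_zero (by omega)
      have hb0 : bestSuffix word = "" := by
        unfold bestSuffix
        have hlen : PySem.Str.len word = 0 := by simp [pysem, hnil]
        rw [hlen, PySem.List.pyRange_one_eq_nil (le_refl 0), List.foldl_nil]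
      rw [pvSliceNil word hnil, hb0]
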